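-- pv_equiv track=rewrite | github.com/hallerite/SERE | src/sere/core/semantics.py | _bind_derived_head
-- ===== SOURCE A (Python) =====
-- from typing import Any, Dict, Optional, Set, Tuple, List, Iterable
--
-- def _bind_derived_head(head_terms: List[str], args: Tuple[str, ...]) -> Optional[Dict[str, str]]:
--     if len(head_terms) != len(args):
--         return None
--     bind: Dict[str, str] = {}
--     for term, arg in zip(head_terms, args):
--         if term.startswith("?"):
--             v = term[1:]
--             if v in bind and bind[v] != arg:
--                 return None
--             bind[v] = arg
--         else:
--             if term != arg:
--                 return None
--     return bind
-- ===== SOURCE B (Python) =====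
-- from typing import Dict, Optional, Tuple, List
--
--
-- def _bind_derived_head(head_terms: List[str], args: Tuple[str, ...]) -> Optional[Dict[str, str]]:
--     if len(head_terms) != len(args):
--         return None
--     # Pass 1: check literal positions, group the args seen at each variable's positions.
--     groups: Dict[str, List[str]] = {}
--     for term, arg in zip(head_terms, args):
--         if term.startswith("?"):
--             groups.setdefault(term[1:], []).append(arg)
--         else:
--             if term != arg:
--                 return None
--     # Pass 2: each variable's collected values must all agree.
--     bind: Dict[str, str] = {}
--     for name, vals in groups.items():
--         first = vals[0]
--         if any(v != first for v in vals[1:]):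
--             return None
--         bind[name] = first
--     return bind
-- ===== Notes on version B (the rewrite author's own statement) =====
-- stated objective: alternative
-- what changed: A interleaves binding and consistency checking in one loop over a name->value dict; B does two passes: it first groups every variable's argument values into a name->list-of-values dict (checking literal positions on the way), then checks each group is constant and binds each variable to its common value.
import Mathlib
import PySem

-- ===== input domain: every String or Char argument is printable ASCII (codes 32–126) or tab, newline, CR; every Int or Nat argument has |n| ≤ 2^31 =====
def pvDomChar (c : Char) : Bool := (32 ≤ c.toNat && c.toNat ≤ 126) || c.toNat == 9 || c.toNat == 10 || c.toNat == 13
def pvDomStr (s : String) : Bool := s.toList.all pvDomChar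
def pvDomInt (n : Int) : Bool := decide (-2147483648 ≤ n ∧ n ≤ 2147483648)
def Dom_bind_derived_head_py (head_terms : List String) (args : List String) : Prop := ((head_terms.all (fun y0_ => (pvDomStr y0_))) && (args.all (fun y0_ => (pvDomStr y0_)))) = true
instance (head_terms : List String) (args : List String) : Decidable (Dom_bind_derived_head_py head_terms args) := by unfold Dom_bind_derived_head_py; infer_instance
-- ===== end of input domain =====

-- B replaces A's incremental bind-and-check loop by a two-pass decomposition (first group each
-- variable's argument values, then check each group is constant); objective: alternative.

-- ===== PORT A =====
-- the 'for term, arg in zip(...)' loop, carrying the bind dict; early 'return None' = none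
def pvGoA : List (String × String) → PySem.Dict String String → Option (PySem.Dict String String)
  | [], bind => some bind
  | (term, arg) :: rest, bind =>
    if PySem.Str.startswith term "?" then
      let v := PySem.Str.slice term (some 1) none
      if Option.any (fun x => x != arg) (bind.get? v) then none   -- 'v in bind and bind[v] != arg'
      else pvGoA rest (bind.insert v arg)
    else if term != arg then none
    else pvGoA rest bind

def bind_derived_head_py (head_terms : List String) (args : List String) : Option (List (String × String)) :=
  if head_terms.length != args.length then none
  else (pvGoA (head_terms.zip args) PySem.Dict.empty).map (·.items)

-- ===== PORT B =====
-- pass 1: check literal positions, group each variable's values ('groups.setdefault(v, []).append(arg)')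
def pvCollectB : List (String × String) → PySem.Dict String (List String) → Option (PySem.Dict String (List String))
  | [], g => some g
  | (term, arg) :: rest, g =>
    if PySem.Str.startswith term "?" then
      pvCollectB rest (g.modify (PySem.Str.slice term (some 1) none) [] (· ++ [arg]))
    else if term != arg then none
    else pvCollectB rest g

-- pass 2: 'for name, vals in groups.items(): …'; the [] case is unreachable (groups' value lists
-- are nonempty; it is where Python's vals[0] would raise)
def pvFinalizeB : List (String × List String) → PySem.Dict String String → Option (PySem.Dict String String)
  | [], bind => some bind
  | (name, vals) :: rest, bind =>
    match vals with
    | [] => none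
    | v0 :: vs => if vs.any (fun v => v != v0) then none else pvFinalizeB rest (bind.insert name v0)

def bind_derived_head_py_alt (head_terms : List String) (args : List String) : Option (List (String × String)) :=
  if head_terms.length != args.length then none
  else (pvCollectB (head_terms.zip args) PySem.Dict.empty).bind
    (fun g => (pvFinalizeB g.items PySem.Dict.empty).map (·.items))

-- ===== PRECONDITION & SPEC =====
def Spec_bind_derived_head_py (head_terms : List String) (args : List String) (out : Option (List (String × String))) : Prop := out = bind_derived_head_py_alt head_terms args
instance (head_terms : List String) (args : List String) (out : Option (List (String × String))) : Decidable (Spec_bind_derived_head_py head_terms args out) := by unfold Spec_bind_derived_head_py; infer_instance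

-- ===== CLAIM (what is proved, stated in full; the proofs are below) =====
def Claim_equal_bind_derived_head_py : Prop := ∀ (head_terms : List String) (args : List String), Dom_bind_derived_head_py head_terms args → Spec_bind_derived_head_py head_terms args (bind_derived_head_py head_terms args)

-- ===== LEMMAS AND PROOFS =====

def pvGood : String × List String → Bool
  | (_, []) => false
  | (_, v0 :: vs) => vs.all (fun v => v == v0)

def pvHead : String × List String → String × String := fun p => (p.1, p.2.headD "")

theorem pvFinalizeB_eq (L : List (String × List String)) (b : PySem.Dict String String) :
    pvFinalizeB L b = if L.all pvGood then
      some (L.foldl (fun d p => d.insert p.1 (p.2.headD "")) b) else none := by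
  induction L generalizing b with
  | nil => simp [pvFinalizeB]
  | cons p rest ih =>
    obtain ⟨name, vals⟩ := p
    cases vals with
    | nil => simp [pvFinalizeB, pvGood]
    | cons v0 vs =>
      simp only [pvFinalizeB, List.all_cons, pvGood]
      by_cases hg : vs.all (fun v => v == v0)
      · have : vs.any (fun v => v != v0) = false := by
          simp only [List.any_eq_false]; intro v hv
          simpa using List.all_eq_true.mp hg v hv
        simp only [this, Bool.false_eq_true, if_false, ih, hg, Bool.true_and, List.foldl_cons, List.headD_cons]
      · have : vs.any (fun v => v != v0) = true := by
          rw [List.any_eq_true]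
          obtain ⟨v, hv, hne⟩ := by simpa [List.all_eq_true] using hg
          exact ⟨v, hv, by simpa using hne⟩
        simp [this, hg]

-- lookup in the headD-image dict
theorem pvGet_mk_map (L : List (String × List String)) (k : String) :
    (PySem.Dict.mk (L.map pvHead)).get? k = ((PySem.Dict.mk L).get? k).map (fun vals => vals.headD "") := by
  induction L with
  | nil => rfl
  | cons p rest ih =>
    obtain ⟨a, b⟩ := p
    simp only [List.map_cons, pvHead, PySem.Dict.get?_mk_cons]
    by_cases h : (a == k) = true
    · simp [h]
    · simp [h, ih]

def pvBad (g : PySem.Dict String (List String)) : Prop :=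
  ∃ p ∈ g.items, ∃ v0 vs, p.2 = v0 :: vs ∧ vs.all (fun v => v == v0) = false

theorem pvBad_all_false {g : PySem.Dict String (List String)} (h : pvBad g) :
    g.items.all pvGood = false := by
  obtain ⟨p, hp, v0, vs, hv, hall⟩ := h
  rw [← Bool.not_eq_true, List.all_eq_true]
  intro hc
  have := hc p hp
  rw [show p = (p.1, v0 :: vs) from Prod.ext rfl hv] at this
  simp [pvGood, hall] at this

theorem pvBad_insert (g : PySem.Dict String (List String)) (v : String) (a : String)
    (hnd : g.keys.Nodup) (h : pvBad g) :
    pvBad (g.insert v (g.getD v [] ++ [a])) := by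
  obtain ⟨p, hp, v0, vs, hv, hall⟩ := h
  unfold pvBad
  by_cases hc : g.contains v = true
  · rw [PySem.Dict.items_insert_of_contains g _ hc]
    by_cases hk : (p.1 == v) = true
    · refine ⟨(v, g.getD v [] ++ [a]), ?_, v0, vs ++ [a], ?_, ?_⟩
      · exact List.mem_map.mpr ⟨p, hp, by simp [hk]⟩
      · have : g.getD v [] = p.2 := by
          have hkv : p.1 = v := by simpa using hk
          have : g.getD p.1 [] = p.2 :=
            PySem.Dict.getD_of_mem_items g (by simpa using hp) hnd []
          rwa [hkv] at this
        rw [this, hv]; simp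
      · simp [hall]
    · exact ⟨p, List.mem_map.mpr ⟨p, hp, by simp [hk]⟩, v0, vs, hv, hall⟩
  · rw [PySem.Dict.items_insert_of_not_contains g _ (by simpa using hc)]
    exact ⟨p, List.mem_append_left _ hp, v0, vs, hv, hall⟩

theorem pvCollect_bad (pairs : List (String × String)) (g : PySem.Dict String (List String))
    (hnd : g.keys.Nodup) (h : pvBad g) :
    (pvCollectB pairs g).bind (fun g' => (pvFinalizeB g'.items PySem.Dict.empty).map (·.items)) = none := by
  induction pairs generalizing g with
  | nil =>
    simp [pvCollectB, pvFinalizeB_eq, pvBad_all_false h]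
  | cons p rest ih =>
    obtain ⟨t, a⟩ := p
    simp only [pvCollectB]
    by_cases hs : PySem.Str.startswith t "?"
    · simp only [hs, if_true]
      exact ih _ (PySem.Dict.nodup_keys_insert _ _ _ hnd) (pvBad_insert _ _ _ hnd h)
    · simp only [hs, Bool.false_eq_true, if_false]
      by_cases hta : (t != a) = true
      · simp [hta]
      · simp only [hta, Bool.false_eq_true, if_false]
        exact ih g hnd h

def pvRel (g : PySem.Dict String (List String)) (bind : PySem.Dict String String) : Prop :=
  g.keys.Nodup ∧ g.items.all pvGood = true ∧ bind = PySem.Dict.mk (g.items.map pvHead)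

theorem pvMain (pairs : List (String × String)) (g : PySem.Dict String (List String))
    (bind : PySem.Dict String String) (h : pvRel g bind) :
    (pvGoA pairs bind).map (·.items) =
      (pvCollectB pairs g).bind (fun g' => (pvFinalizeB g'.items PySem.Dict.empty).map (·.items)) := by
  induction pairs generalizing g bind with
  | nil =>
    obtain ⟨hnd, hgood, hbind⟩ := h
    simp only [pvGoA, pvCollectB, Option.bind_some, pvFinalizeB_eq, hgood, if_true]
    have hfold := PySem.Dict.items_foldl_insert_fresh (ν := String) g.items (fun p => p.1)
      (fun p => p.2.headD "") PySem.Dict.empty (fun p _ => PySem.Dict.contains_empty _) hnd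
    simp only [Option.map_some, Option.some.injEq, hbind]
    rw [hfold]
    simp [pvHead, PySem.Dict.empty]
  | cons p rest ih =>
    obtain ⟨hnd, hgood, hbind⟩ := h
    obtain ⟨t, a⟩ := p
    simp only [pvGoA, pvCollectB]
    by_cases hs : PySem.Str.startswith t "?"
    · simp only [hs, if_true]
      set v := PySem.Str.slice t (some 1) none with hvdef
      have hget : bind.get? v = (g.get? v).map (fun vals => vals.headD "") := by
        rw [hbind]; exact pvGet_mk_map g.items v
      cases hg : g.get? v with
      | none =>
        have hcb : bind.contains v = false := by
          rw [PySem.Dict.contains_eq_isSome_get?, hget, hg]; rfl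
        have hcg : g.contains v = false := by
          rw [PySem.Dict.contains_eq_isSome_get?, hg]; rfl
        have hcond : Option.any (fun x => x != a) (bind.get? v) = false := by
          rw [hget, hg]; rfl
        simp only [hcond, Bool.false_eq_true, if_false]
        refine ih _ _ ⟨PySem.Dict.nodup_keys_insert _ _ _ hnd, ?_, ?_⟩
        · rw [show g.modify v [] (· ++ [a]) = g.insert v (g.getD v [] ++ [a]) from rfl,
            PySem.Dict.items_insert_of_not_contains g _ hcg,
            PySem.Dict.getD_of_not_contains g [] hcg]
          simp [hgood, pvGood]
        · apply PySem.Dict.ext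
          rw [show g.modify v [] (· ++ [a]) = g.insert v (g.getD v [] ++ [a]) from rfl,
            PySem.Dict.items_insert_of_not_contains g _ hcg,
            PySem.Dict.items_insert_of_not_contains bind _ hcb,
            PySem.Dict.getD_of_not_contains g [] hcg, hbind]
          simp [pvHead]
      | some vals =>
        -- the found entry is good, so vals = v0 :: vs with vs all equal to v0
        obtain ⟨pr, hfind⟩ : ∃ pr, g.items.find? (fun q => q.1 == v) = some pr := by
          have : (Option.map (fun x => x.2) (g.items.find? (fun q => q.1 == v))) = some vals := hg
          cases hf : g.items.find? (fun q => q.1 == v) with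
          | none => rw [hf] at this; exact absurd this (by simp)
          | some pr => exact ⟨pr, rfl⟩
        have hmem : pr ∈ g.items := List.mem_of_find?_eq_some hfind
        have hprk : (pr.1 == v) = true := by simpa using List.find?_some hfind
        have hprv : pr.2 = vals := by
          have : (Option.map (fun x => x.2) (g.items.find? (fun q => q.1 == v))) = some vals := hg
          rw [hfind] at this; simpa using this
        have hgoodpr : pvGood pr = true := List.all_eq_true.mp hgood pr hmem
        obtain ⟨v0, vs, hvals⟩ : ∃ v0 vs, vals = v0 :: vs := by
          cases hvv : vals with
          | nil =>
            exfalso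
            have hg2 : pvGood (pr.1, pr.2) = true := hgoodpr
            rw [hprv, hvv] at hg2
            simp [pvGood] at hg2
          | cons v0 vs => exact ⟨v0, vs, rfl⟩
        have hvs : vs.all (fun x => x == v0) = true := by
          have hg2 : pvGood (pr.1, pr.2) = true := hgoodpr
          rw [hprv, hvals] at hg2
          simpa [pvGood] using hg2
        have hcg : g.contains v = true := by
          rw [PySem.Dict.contains_eq_isSome_get?, hg]; rfl
        have hcb : bind.contains v = true := by
          rw [PySem.Dict.contains_eq_isSome_get?, hget, hg]; rfl
        have hgetD : g.getD v [] = vals := PySem.Dict.getD_of_get?_eq_some g [] hg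
        have hmod : g.modify v [] (· ++ [a]) = g.insert v (vals ++ [a]) := by
          rw [show g.modify v [] (· ++ [a]) = g.insert v (g.getD v [] ++ [a]) from rfl, hgetD]
        have hcond : Option.any (fun x => x != a) (bind.get? v) = (v0 != a) := by
          rw [hget, hg, hvals]; rfl
        by_cases hv0a : v0 = a
        · have : Option.any (fun x => x != a) (bind.get? v) = false := by
            rw [hcond, hv0a]; simp
          simp only [this, Bool.false_eq_true, if_false]
          refine ih _ _ ⟨PySem.Dict.nodup_keys_insert _ _ _ hnd, ?_, ?_⟩
          · rw [hmod, PySem.Dict.items_insert_of_contains g _ hcg]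
            rw [List.all_eq_true]
            intro q hq
            obtain ⟨p0, hp0, rfl⟩ := List.mem_map.mp hq
            by_cases hk : (p0.1 == v) = true
            · simp only [hk, if_true]
              rw [hvals]
              show pvGood (v, v0 :: (vs ++ [a])) = true
              simp only [pvGood, List.all_append, hvs, Bool.true_and]
              simp [hv0a]
            · simp only [hk, Bool.false_eq_true, if_false]
              exact List.all_eq_true.mp hgood p0 hp0
          · apply PySem.Dict.ext
            rw [hmod, PySem.Dict.items_insert_of_contains g _ hcg,
              PySem.Dict.items_insert_of_contains bind _ hcb, hbind]
            show List.map _ (List.map pvHead g.items) = List.map pvHead (List.map _ g.items)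
            rw [List.map_map, List.map_map]
            apply List.map_congr_left
            intro p0 _
            by_cases hk : (p0.1 == v) = true
            · simp [Function.comp, pvHead, hk, hvals, hv0a]
            · simp [Function.comp, pvHead, hk]
        · have : Option.any (fun x => x != a) (bind.get? v) = true := by
            rw [hcond]; simpa using hv0a
          simp only [this, if_true, Option.map_none]
          refine (pvCollect_bad rest _ (by rw [hmod]; exact PySem.Dict.nodup_keys_insert _ _ _ hnd) ?_).symm
          rw [hmod]
          refine ⟨(v, vals ++ [a]), ?_, v0, vs ++ [a], by rw [hvals]; rfl, ?_⟩
          · rw [PySem.Dict.items_insert_of_contains g _ hcg]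
            exact List.mem_map.mpr ⟨pr, hmem, by simp [hprk]⟩
          · have hne : (a == v0) = false := beq_eq_false_iff_ne.mpr (Ne.symm hv0a)
            simp [List.all_append, hvs, hne]
    · simp only [hs, Bool.false_eq_true, if_false]
      by_cases hta : (t != a) = true
      · simp [hta]
      · simp only [hta, Bool.false_eq_true, if_false]
        exact ih g bind ⟨hnd, hgood, hbind⟩

-- ===== VERDICT (by name: the statement is the Claim_ definition above) =====
theorem bind_derived_head_py_spec : Claim_equal_bind_derived_head_py := by
  intro hts args _
  unfold Spec_bind_derived_head_py bind_derived_head_py bind_derived_head_py_alt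
  by_cases hlen : hts.length != args.length
  · simp [hlen]
  · simp only [hlen, Bool.false_eq_true, if_false]
    exact pvMain _ _ _ ⟨List.nodup_nil, rfl, rfl⟩
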